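-- pv_equiv track=rewrite | github.com/PythonAberdeen/user_group | 2023/2023-02/dicepoker/hands.py | valid_subset
-- ===== SOURCE A (Python) =====
-- def valid_subset(dice, selection) -> bool:
--     if selection is None:
--         selection = []
--     elif type(selection) == int:
--         selection = [selection]
--     dice = list(dice)
--     for s in selection:
--         if s not in dice:
--             return False
--         dice.remove(s)
--     return True
-- ===== SOURCE B (Python) =====
-- from collections import Counter
--
--
-- def valid_subset(dice, selection) -> bool:
--     if selection is None:
--         selection = []
--     elif type(selection) == int:
--         selection = [selection]
--     return Counter(selection) <= Counter(dice)
-- ===== Notes on version B (the rewrite author's own statement) =====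
-- stated objective: idiomatic
-- what changed: Replaced the per-element membership-test-and-remove loop over a mutable copy of dice by building two Counters once and comparing them with the multiset inclusion Counter(selection) <= Counter(dice).
import Mathlib
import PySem

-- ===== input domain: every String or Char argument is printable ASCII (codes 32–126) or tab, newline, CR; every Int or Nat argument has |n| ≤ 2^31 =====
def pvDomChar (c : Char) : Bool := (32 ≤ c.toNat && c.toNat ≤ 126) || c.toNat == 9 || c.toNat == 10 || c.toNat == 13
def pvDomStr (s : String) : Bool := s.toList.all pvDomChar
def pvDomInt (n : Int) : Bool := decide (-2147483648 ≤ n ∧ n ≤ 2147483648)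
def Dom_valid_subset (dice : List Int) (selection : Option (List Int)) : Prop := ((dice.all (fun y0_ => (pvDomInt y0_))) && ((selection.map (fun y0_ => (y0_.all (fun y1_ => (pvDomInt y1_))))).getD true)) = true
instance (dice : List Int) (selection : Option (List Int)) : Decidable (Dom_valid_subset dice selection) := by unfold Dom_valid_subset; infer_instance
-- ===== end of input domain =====

-- B replaces A's scan-and-remove loop over a mutable copy of dice by a count-then-compare
-- (Counter inclusion) formulation; equivalence of the return values is proved below.

-- ===== PORT A =====
-- the for-loop of A: membership test, early return False, dice.remove(s) (first occurrence)
def validSubsetGo : List Int → List Int → Bool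
  | [], _ => true
  | s :: rest, d => if d.contains s then validSubsetGo rest (d.erase s) else false

def valid_subset (dice : List Int) (selection : Option (List Int)) : Bool :=
  -- 'if selection is None: selection = []' (the int branch is unreachable under this type)
  let sel := match selection with | none => [] | some l => l
  validSubsetGo sel dice

-- ===== PORT B =====
-- Counter(selection) <= Counter(dice): every (key, count) of the left counter is covered on the right
def valid_subset_alt (dice : List Int) (selection : Option (List Int)) : Bool :=
  let sel := match selection with | none => [] | some l => l
  (PySem.Dict.counter sel).items.all (fun kv => kv.2 ≤ (PySem.Dict.counter dice).getD kv.1 0)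

-- ===== PRECONDITION & SPEC =====
def Spec_valid_subset (dice : List Int) (selection : Option (List Int)) (out : Bool) : Prop := out = valid_subset_alt dice selection
instance (dice : List Int) (selection : Option (List Int)) (out : Bool) : Decidable (Spec_valid_subset dice selection out) := by unfold Spec_valid_subset; infer_instance

-- ===== CLAIM (what is proved, stated in full; the proofs are below) =====
def Claim_equal_valid_subset : Prop := ∀ (dice : List Int) (selection : Option (List Int)), Dom_valid_subset dice selection → Spec_valid_subset dice selection (valid_subset dice selection)

-- ===== LEMMAS AND PROOFS =====

theorem validSubsetGo_iff (sel : List Int) : ∀ (d : List Int),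
    validSubsetGo sel d = true ↔ ∀ k : Int, sel.count k ≤ d.count k := by
  induction sel with
  | nil => intro d; simp [validSubsetGo]
  | cons s rest ih =>
    intro d
    by_cases hs : s ∈ d
    · have hd : d.contains s = true := by simpa using hs
      have hcnt : 1 ≤ d.count s := List.one_le_count_iff.mpr hs
      simp only [validSubsetGo, hd, if_pos]
      rw [ih]
      constructor
      · intro h k
        have hk := h k
        by_cases hks : k = s
        · subst hks
          have he : (d.erase k).count k = d.count k - 1 := List.count_erase_self ..
          rw [he] at hk
          simp only [List.count_cons_self]
          omega
        · have he : (d.erase s).count k = d.count k := List.count_erase_of_ne hks ..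
          rw [he] at hk
          simpa [List.count_cons, Ne.symm hks] using hk
      · intro h k
        have hk := h k
        by_cases hks : k = s
        · subst hks
          have he : (d.erase k).count k = d.count k - 1 := List.count_erase_self ..
          rw [he]
          simp only [List.count_cons_self] at hk
          omega
        · have he : (d.erase s).count k = d.count k := List.count_erase_of_ne hks ..
          rw [he]
          simpa [List.count_cons, Ne.symm hks] using hk
    · have hd : d.contains s = false := by simpa using hs
      have h0 : d.count s = 0 := List.count_eq_zero.mpr hs
      simp only [validSubsetGo, hd, if_false, Bool.false_eq_true, false_iff]
      intro h
      have hk := h s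
      simp only [List.count_cons_self, h0] at hk
      omega

theorem alt_iff (sel d : List Int) :
    ((PySem.Dict.counter sel).items.all (fun kv => kv.2 ≤ (PySem.Dict.counter d).getD kv.1 0)) = true
      ↔ ∀ k : Int, sel.count k ≤ d.count k := by
  rw [PySem.Dict.items_counter]
  simp only [List.all_map, List.all_eq_true, Function.comp]
  constructor
  · intro h k
    by_cases hk : k ∈ sel
    · have hk' : k ∈ PySem.Set.ofList sel := by
        simpa [PySem.Set.mem_ofList] using hk
      have := h k hk'
      simpa [PySem.Dict.getD_counter] using this
    · have : sel.count k = 0 := List.count_eq_zero.mpr hk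
      omega
  · intro h k _
    have := h k
    simp [PySem.Dict.getD_counter]
    exact_mod_cast this

-- ===== VERDICT (by name: the statement is the Claim_ definition above) =====
theorem valid_subset_spec : Claim_equal_valid_subset := by
  intro dice selection _
  unfold Spec_valid_subset valid_subset valid_subset_alt
  cases selection with
  | none =>
    simp only []
    rw [Bool.eq_iff_iff, validSubsetGo_iff, alt_iff]
  | some l =>
    simp only []
    rw [Bool.eq_iff_iff, validSubsetGo_iff, alt_iff]
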